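-- pv_equiv track=rewrite | github.com/kelbykleinsasser/popfly-mcp-snowflake | cortex/generate_tool_description_dynamic.py | _extract_key_entities
-- ===== SOURCE A (Python) =====
-- from typing import Dict, List, Optional, Any
--
-- def _extract_key_entities(columns: List[tuple]) -> List[str]:
--     """Extract key entities from column metadata"""
--     entities = []
--
--     # Group columns by entity type
--     creator_cols = []
--     company_cols = []
--     campaign_cols = []
--     payment_cols = []
--
--     for col_name, meaning, keywords_json, examples in columns:
--         col_upper = col_name.upper()
--
--         if 'CREATOR' in col_upper or 'STRIPE_CONNECTED' in col_upper:
--             creator_cols.append((col_name, meaning, examples))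
--         elif 'COMPANY' in col_upper or 'STRIPE_CUSTOMER' in col_upper:
--             company_cols.append((col_name, meaning, examples))
--         elif 'CAMPAIGN' in col_upper:
--             campaign_cols.append((col_name, meaning, examples))
--         elif 'PAYMENT' in col_upper or 'AMOUNT' in col_upper:
--             payment_cols.append((col_name, meaning, examples))
--
--     # Build entity descriptions
--     if creator_cols:
--         examples = [ex for _, _, ex in creator_cols if ex]
--         entities.append(f"• Creators (by name, Stripe account, or user ID)")
--
--     if company_cols:
--         entities.append(f"• Companies/Customers (by name, Stripe customer ID)")
--
--     if campaign_cols: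
--         entities.append(f"• Campaigns/Projects (by name)")
--
--     if payment_cols:
--         entities.append(f"• Payment amounts, dates, and statuses")
--
--     return entities
-- ===== SOURCE B (Python) =====
-- _TABLE = [
--     ("creator", ("CREATOR", "STRIPE_CONNECTED"), "• Creators (by name, Stripe account, or user ID)"),
--     ("company", ("COMPANY", "STRIPE_CUSTOMER"), "• Companies/Customers (by name, Stripe customer ID)"),
--     ("campaign", ("CAMPAIGN",), "• Campaigns/Projects (by name)"),
--     ("payment", ("PAYMENT", "AMOUNT"), "• Payment amounts, dates, and statuses"),
-- ]
--
-- def _extract_key_entities(columns):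
--     present = set()
--     for col_name, _meaning, _keywords_json, _examples in columns:
--         u = col_name.upper()
--         for cat, kws, _desc in _TABLE:
--             if any(k in u for k in kws):
--                 present.add(cat)
--                 break
--     return [desc for cat, _kws, desc in _TABLE if cat in present]
-- ===== Notes on version B (the rewrite author's own statement) =====
-- stated objective: idiomatic
-- what changed: Replaced the four accumulation lists and unrolled if/elif chain with an ordered category table driving a single scan that records present categories in a set, then emits descriptions by filtering the table.
import Mathlib
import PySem

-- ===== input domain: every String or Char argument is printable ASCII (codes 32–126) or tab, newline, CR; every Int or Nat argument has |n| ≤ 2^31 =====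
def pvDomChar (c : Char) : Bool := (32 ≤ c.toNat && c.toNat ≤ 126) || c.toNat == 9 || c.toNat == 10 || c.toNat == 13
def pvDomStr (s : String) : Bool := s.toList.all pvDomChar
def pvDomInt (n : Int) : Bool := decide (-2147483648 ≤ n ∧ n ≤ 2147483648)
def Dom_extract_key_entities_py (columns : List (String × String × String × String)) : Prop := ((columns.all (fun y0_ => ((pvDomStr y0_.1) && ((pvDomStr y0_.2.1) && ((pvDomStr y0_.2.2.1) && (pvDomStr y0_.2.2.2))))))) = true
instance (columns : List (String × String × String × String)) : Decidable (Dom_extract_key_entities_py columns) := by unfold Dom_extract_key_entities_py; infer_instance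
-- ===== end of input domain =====

-- B replaces A's four accumulation lists and unrolled if/elif chain by a single ordered
-- category table driving one scan that maintains a set of present categories (objective: idiomatic).

-- ===== PORT A =====
-- state: (creator_cols, company_cols, campaign_cols, payment_cols)
def pvAStep (acc : List (String × String × String) × List (String × String × String) × List (String × String × String) × List (String × String × String))
    (c : String × String × String × String) :
    List (String × String × String) × List (String × String × String) × List (String × String × String) × List (String × String × String) :=
  let (col_name, meaning, _keywords_json, examples) := c
  let u := PySem.Str.upper col_name
  if PySem.Str.isIn "CREATOR" u || PySem.Str.isIn "STRIPE_CONNECTED" u then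
    (acc.1 ++ [(col_name, meaning, examples)], acc.2.1, acc.2.2.1, acc.2.2.2)
  else if PySem.Str.isIn "COMPANY" u || PySem.Str.isIn "STRIPE_CUSTOMER" u then
    (acc.1, acc.2.1 ++ [(col_name, meaning, examples)], acc.2.2.1, acc.2.2.2)
  else if PySem.Str.isIn "CAMPAIGN" u then
    (acc.1, acc.2.1, acc.2.2.1 ++ [(col_name, meaning, examples)], acc.2.2.2)
  else if PySem.Str.isIn "PAYMENT" u || PySem.Str.isIn "AMOUNT" u then
    (acc.1, acc.2.1, acc.2.2.1, acc.2.2.2 ++ [(col_name, meaning, examples)])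
  else acc

def extract_key_entities_py (columns : List (String × String × String × String)) : List String :=
  let st := columns.foldl pvAStep ([], [], [], [])
  let e0 : List String := []
  let e1 := if st.1 ≠ [] then e0 ++ ["• Creators (by name, Stripe account, or user ID)"] else e0
  let e2 := if st.2.1 ≠ [] then e1 ++ ["• Companies/Customers (by name, Stripe customer ID)"] else e1
  let e3 := if st.2.2.1 ≠ [] then e2 ++ ["• Campaigns/Projects (by name)"] else e2
  let e4 := if st.2.2.2 ≠ [] then e3 ++ ["• Payment amounts, dates, and statuses"] else e3
  e4

-- ===== PORT B =====
-- the ordered category table: (category id, keyword substrings, description)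
def pvTable : List (String × List String × String) :=
  [("creator", ["CREATOR", "STRIPE_CONNECTED"], "• Creators (by name, Stripe account, or user ID)"),
   ("company", ["COMPANY", "STRIPE_CUSTOMER"], "• Companies/Customers (by name, Stripe customer ID)"),
   ("campaign", ["CAMPAIGN"], "• Campaigns/Projects (by name)"),
   ("payment", ["PAYMENT", "AMOUNT"], "• Payment amounts, dates, and statuses")]

def pvBStep (present : PySem.Set String) (c : String × String × String × String) : PySem.Set String :=
  let u := PySem.Str.upper c.1
  match pvTable.find? (fun t => t.2.1.any (fun k => PySem.Str.isIn k u)) with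
  | some t => PySem.Set.add present t.1
  | none => present

def extract_key_entities_py_alt (columns : List (String × String × String × String)) : List String :=
  let present := columns.foldl pvBStep PySem.Set.empty
  (pvTable.filter (fun t => PySem.Set.contains present t.1)).map (fun t => t.2.2)

-- ===== PRECONDITION & SPEC =====
def Spec_extract_key_entities_py (columns : List (String × String × String × String)) (out : List String) : Prop := out = extract_key_entities_py_alt columns
instance (columns : List (String × String × String × String)) (out : List String) : Decidable (Spec_extract_key_entities_py columns out) := by unfold Spec_extract_key_entities_py; infer_instance

-- ===== CLAIM (what is proved, stated in full; the proofs are below) =====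
def Claim_equal_extract_key_entities_py : Prop := ∀ (columns : List (String × String × String × String)), Dom_extract_key_entities_py columns → Spec_extract_key_entities_py columns (extract_key_entities_py columns)

-- ===== LEMMAS AND PROOFS =====

-- invariant tying A's four accumulator lists to B's set of present categories
def pvInv (acc : List (String × String × String) × List (String × String × String) × List (String × String × String) × List (String × String × String))
    (s : PySem.Set String) : Prop :=
  (PySem.Set.contains s "creator" = true ↔ acc.1 ≠ []) ∧
  (PySem.Set.contains s "company" = true ↔ acc.2.1 ≠ []) ∧
  (PySem.Set.contains s "campaign" = true ↔ acc.2.2.1 ≠ []) ∧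
  (PySem.Set.contains s "payment" = true ↔ acc.2.2.2 ≠ [])

theorem pvInv_step (acc : List (String × String × String) × List (String × String × String) × List (String × String × String) × List (String × String × String))
    (s : PySem.Set String) (c : String × String × String × String) (h : pvInv acc s) :
    pvInv (pvAStep acc c) (pvBStep s c) := by
  obtain ⟨h1, h2, h3, h4⟩ := h
  obtain ⟨n, m, k, e⟩ := c
  simp only [pvAStep, pvBStep, pvTable, List.find?, List.any]
  cases hb1 : (PySem.Str.isIn "CREATOR" (PySem.Str.upper n) || PySem.Str.isIn "STRIPE_CONNECTED" (PySem.Str.upper n)) <;>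
  cases hb2 : (PySem.Str.isIn "COMPANY" (PySem.Str.upper n) || PySem.Str.isIn "STRIPE_CUSTOMER" (PySem.Str.upper n)) <;>
  cases hb3 : (PySem.Str.isIn "CAMPAIGN" (PySem.Str.upper n)) <;>
  cases hb4 : (PySem.Str.isIn "PAYMENT" (PySem.Str.upper n) || PySem.Str.isIn "AMOUNT" (PySem.Str.upper n)) <;>
    simp only [Bool.or_false, hb1, hb2, hb3, hb4] <;>
    simp_all [pvInv, PySem.Set.add, PySem.Set.contains_eq_listContains] <;>
    split_ifs <;> simp_all

theorem pvInv_foldl (columns : List (String × String × String × String))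
    (acc : List (String × String × String) × List (String × String × String) × List (String × String × String) × List (String × String × String))
    (s : PySem.Set String) (h : pvInv acc s) :
    pvInv (columns.foldl pvAStep acc) (columns.foldl pvBStep s) := by
  induction columns generalizing acc s with
  | nil => exact h
  | cons c rest ih => exact ih _ _ (pvInv_step _ _ _ h)

-- ===== VERDICT (by name: the statement is the Claim_ definition above) =====
theorem extract_key_entities_py_spec : Claim_equal_extract_key_entities_py := by
  intro columns _
  unfold Spec_extract_key_entities_py extract_key_entities_py extract_key_entities_py_alt
  have h := pvInv_foldl columns ([], [], [], []) PySem.Set.empty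
    (by simp [pvInv, PySem.Set.empty, PySem.Set.contains_eq_listContains])
  obtain ⟨h1, h2, h3, h4⟩ := h
  simp only [pvTable, List.filter]
  by_cases b1 : PySem.Set.contains (columns.foldl pvBStep PySem.Set.empty) "creator" = true <;>
  by_cases b2 : PySem.Set.contains (columns.foldl pvBStep PySem.Set.empty) "company" = true <;>
  by_cases b3 : PySem.Set.contains (columns.foldl pvBStep PySem.Set.empty) "campaign" = true <;>
  by_cases b4 : PySem.Set.contains (columns.foldl pvBStep PySem.Set.empty) "payment" = true <;>
    simp_all
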